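-- pv_equiv track=rewrite | github.com/mestru17/bannerize | bannerize.py | new_title_line
-- ===== SOURCE A (Python) =====
-- def new_title_line(section_line: str, title: str) -> str:
--     """Creates a banner title line.
--
--     Args:
--         section_line: A valid LaTeX section or chapter line.
--         title: The title of the banner.
--
--     Returns:
--         A new banner title line with the given title and the same length as
--         the given line.
--     """
--     section_line_width = len(section_line.strip())
--     title_start = section_line_width // 2 - len(title) // 2 - 1
--     title_end = title_start + len(title)
--
--     line_elems = ["%"]
--     i = 0
--     while i < section_line_width - 2:
--         if i >= title_start and i < title_end:
--             line_elems.append(title)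
--             i += len(title)
--         else:
--             line_elems.append(" ")
--             i += 1
--     line_elems.append("%\n")
--
--     return "".join(line_elems)
-- ===== SOURCE B (Python) =====
-- def new_title_line(section_line: str, title: str) -> str:
--     """Creates a banner title line (closed form: centered padding computed arithmetically)."""
--     width = len(section_line.strip()) - 2
--     if width <= 0:
--         return "%%\n"
--     left = max(width // 2 - len(title) // 2, 0)
--     return "%" + " " * left + title + " " * (width - left - len(title)) + "%\n"
-- ===== Notes on version B (the rewrite author's own statement) =====
-- stated objective: simpler
-- what changed: Replaces A's index-tracking while loop that appends chunks one by one with a closed-form construction: early-return when there is no interior, then one expression with an arithmetically computed left pad and remaining right pad.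
import Mathlib
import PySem

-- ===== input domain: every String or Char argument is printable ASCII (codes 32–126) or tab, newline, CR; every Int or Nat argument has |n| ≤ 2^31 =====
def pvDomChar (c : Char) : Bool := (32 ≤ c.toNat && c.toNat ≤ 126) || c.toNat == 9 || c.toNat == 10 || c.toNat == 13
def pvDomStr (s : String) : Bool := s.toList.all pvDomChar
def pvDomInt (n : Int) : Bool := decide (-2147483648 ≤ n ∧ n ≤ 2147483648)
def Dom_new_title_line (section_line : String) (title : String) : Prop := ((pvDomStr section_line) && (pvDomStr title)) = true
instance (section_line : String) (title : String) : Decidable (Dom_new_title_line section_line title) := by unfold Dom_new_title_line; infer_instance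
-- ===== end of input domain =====

-- B builds the line in closed form (computed left/right padding) instead of A's chunk-appending while loop (objective: simpler).

-- ===== PORT A =====
-- A's while loop; fuel (n-2).toNat only makes the recursion total — the Python loop
-- runs at most that many iterations since i starts at 0 and grows by ≥ 1 each step.
def ntlLoop (title : List Char) (ts te w : Int) : Nat → Int → List Char → List Char
  | 0, _, acc => acc
  | fuel+1, i, acc =>
    if i < w then
      if ts ≤ i ∧ i < te then
        ntlLoop title ts te w fuel (i + title.length) (acc ++ title)
      else
        ntlLoop title ts te w fuel (i + 1) (acc ++ [' '])
    else acc

def new_title_line (section_line : String) (title : String) : String :=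
  let n : Int := ((PySem.Chars.strip section_line.toList).length : Int)
  let ts : Int := PySem.Int.floordiv n 2 - PySem.Int.floordiv (title.toList.length : Int) 2 - 1
  let te : Int := ts + (title.toList.length : Int)
  String.ofList (ntlLoop title.toList ts te (n - 2) (n - 2).toNat 0 ['%'] ++ ['%', '\n'])

-- ===== PORT B =====
-- ' ' * k with k possibly negative is List.replicate k.toNat (Python's repeat clamps at 0) — exact.
def new_title_line_alt (section_line : String) (title : String) : String :=
  let width : Int := ((PySem.Chars.strip section_line.toList).length : Int) - 2
  if width ≤ 0 then "%%\n"
  else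
    let left : Int := max (PySem.Int.floordiv width 2 - PySem.Int.floordiv (title.toList.length : Int) 2) 0
    String.ofList ('%' :: (List.replicate left.toNat ' ' ++ title.toList ++
      List.replicate (width - left - (title.toList.length : Int)).toNat ' ' ++ ['%', '\n']))

-- ===== PRECONDITION & SPEC =====
def Spec_new_title_line (section_line : String) (title : String) (out : String) : Prop := out = new_title_line_alt section_line title
instance (section_line : String) (title : String) (out : String) : Decidable (Spec_new_title_line section_line title out) := by unfold Spec_new_title_line; infer_instance

-- ===== CLAIM (what is proved, stated in full; the proofs are below) =====
def Claim_equal_new_title_line : Prop := ∀ (section_line : String) (title : String), Dom_new_title_line section_line title → Spec_new_title_line section_line title (new_title_line section_line title)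

-- ===== LEMMAS AND PROOFS =====

/-- If no index of the remaining range hits the title window, the loop emits only spaces. -/
lemma ntlLoop_nohit (title : List Char) (ts te w : Int) :
    ∀ (fuel : Nat) (i : Int) (acc : List Char),
      (w - i).toNat ≤ fuel →
      (∀ j : Int, i ≤ j → j < w → ¬(ts ≤ j ∧ j < te)) →
      ntlLoop title ts te w fuel i acc = acc ++ List.replicate (w - i).toNat ' ' := by
  intro fuel
  induction fuel with
  | zero =>
    intro i acc hf _
    have : (w - i).toNat = 0 := by omega
    simp [ntlLoop, this]
  | succ f ih =>
    intro i acc hf hno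
    by_cases hi : i < w
    · have hcond : ¬(ts ≤ i ∧ i < te) := hno i le_rfl hi
      have := ih (i + 1) (acc ++ [' ']) (by omega)
        (fun j hj hjw => hno j (by omega) hjw)
      simp only [ntlLoop, if_pos hi, if_neg hcond, this]
      have hrep : (w - i).toNat = (w - (i + 1)).toNat + 1 := by omega
      rw [hrep, List.replicate_succ]
      simp
    · have : (w - i).toNat = 0 := by omega
      simp [ntlLoop, if_neg hi, this]

/-- When the title window is actually reached, the loop emits spaces up to
    s = max ts 0, then the whole title, then trailing spaces. -/
lemma ntlLoop_hit (title : List Char) (ts w : Int)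
    (h1 : title ≠ []) (h2 : 0 < ts + (title.length : Int)) (h3 : max ts 0 < w) :
    ∀ (fuel : Nat) (i : Int) (acc : List Char),
      0 ≤ i → i ≤ max ts 0 → (w - i).toNat ≤ fuel →
      ntlLoop title ts (ts + (title.length : Int)) w fuel i acc =
        acc ++ List.replicate (max ts 0 - i).toNat ' ' ++ title ++
          List.replicate (w - max ts 0 - (title.length : Int)).toNat ' ' := by
  have hlen : 0 < title.length := List.length_pos_iff.mpr h1
  intro fuel
  induction fuel with
  | zero =>
    intro i acc h0 hs hf
    exfalso; omega
  | succ f ih =>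
    intro i acc h0 hs hf
    have hi : i < w := by omega
    by_cases heq : i = max ts 0
    · subst heq
      have hcond : ts ≤ max ts 0 ∧ max ts 0 < ts + (title.length : Int) := by
        constructor
        · exact le_max_left _ _
        · omega
      simp only [ntlLoop, if_pos hi, if_pos hcond]
      rw [ntlLoop_nohit title ts (ts + (title.length : Int)) w f
        (max ts 0 + title.length) (acc ++ title) (by omega)
        (fun j hj _ hcon => by omega)]
      have : (w - (max ts 0 + (title.length : Int))).toNat
          = (w - max ts 0 - (title.length : Int)).toNat := by omega
      rw [this]
      simp
    · have hlt : i < max ts 0 := by omega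
      have hts : ts = max ts 0 := by omega
      have hcond : ¬(ts ≤ i ∧ i < ts + (title.length : Int)) := by omega
      simp only [ntlLoop, if_pos hi, if_neg hcond]
      rw [ih (i + 1) (acc ++ [' ']) (by omega) (by omega) (by omega)]
      have hrep : (max ts 0 - i).toNat = (max ts 0 - (i + 1)).toNat + 1 := by omega
      rw [hrep, List.replicate_succ]
      simp

-- ===== VERDICT (by name: the statement is the Claim_ definition above) =====
theorem new_title_line_spec : Claim_equal_new_title_line := by
  intro section_line title _
  unfold Spec_new_title_line new_title_line new_title_line_alt
  simp only []
  set n : Int := ((PySem.Chars.strip section_line.toList).length : Int) with hn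
  set L : List Char := title.toList with hL
  -- relate A's title_start to B's centered left pad: (n)//2 = (n-2)//2 + 1
  have hfd2 : ∀ a : Int, PySem.Int.floordiv a 2 = a / 2 := fun a =>
    PySem.Int.floordiv_eq_ediv_of_pos (by omega)
  have hts : PySem.Int.floordiv n 2 - PySem.Int.floordiv (L.length : Int) 2 - 1
      = PySem.Int.floordiv (n - 2) 2 - PySem.Int.floordiv (L.length : Int) 2 := by
    rw [hfd2, hfd2, hfd2]; omega
  rw [hts]
  set ts : Int := PySem.Int.floordiv (n - 2) 2 - PySem.Int.floordiv (L.length : Int) 2 with htsdef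
  have hts2 : ts = (n - 2) / 2 - (L.length : Int) / 2 := by rw [htsdef, hfd2, hfd2]
  by_cases hw : n - 2 ≤ 0
  · rw [if_pos hw]
    rw [ntlLoop_nohit L ts (ts + (L.length : Int)) (n - 2) ((n - 2).toNat) 0 ['%']
      (by omega) (fun j hj hjw _ => by omega)]
    have h0 : ((n - 2) - 0).toNat = 0 := by omega
    rw [h0]
    rfl
  · rw [if_neg hw]
    by_cases hnil : L = []
    · have hlen0 : (L.length : Int) = 0 := by rw [hnil]; rfl
      have hwin : ∀ j : Int, 0 ≤ j → j < n - 2 → ¬(ts ≤ j ∧ j < ts + (L.length : Int)) := by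
        intro j _ _ hcon; omega
      rw [ntlLoop_nohit L ts (ts + (L.length : Int)) (n - 2) ((n - 2).toNat) 0 ['%']
        (by omega) hwin]
    
      have htsge : 0 ≤ ts := by rw [hts2]; omega
      have hsplit : ((n - 2) - 0).toNat = (max ts 0).toNat + ((n - 2) - max ts 0 - (L.length : Int)).toNat := by
        rw [hts2] at *
        omega
      rw [hsplit, List.replicate_add, hnil]
      simp
  
    · have hlen : 0 < (L.length : Int) := by
        exact_mod_cast List.length_pos_iff.mpr hnil
      have h2 : 0 < ts + (L.length : Int) := by rw [hts2]; omega
      have h3 : max ts 0 < n - 2 := by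
        have := hts2
        omega
      rw [ntlLoop_hit L ts (n - 2) hnil h2 h3 ((n - 2).toNat) 0 ['%']
        le_rfl (by omega) (by omega)]
      have e1 : (max ts 0 - 0).toNat = (max ts 0).toNat := by omega
      rw [e1]
      simp
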